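-- pv_equiv track=rewrite | github.com/prachi-77/aapkapainter-tasks- | problem2_cricketScores.py | cricket_scores
-- ===== SOURCE A (Python) =====
-- def cricket_scores(scores):
--     p1,p2=0,0
--     to_add=None
--     for i in range(0,len(scores)):
--         player_score=scores[i]
--
--         #for first elemnt of array
--         if i==0 and player_score%2!=0:
--             to_add='p2'
--             p1+=player_score
--         elif i==0 and player_score%2==0 :
--             p2+=player_score
--             to_add='p1'
--
--
--         if i!=0:
--             if to_add=='p1':
--                 p1+=player_score
--             else:
--                 p2+=player_score
--
--
--             to_add='p2' if player_score%2==0 and to_add=='p2' else 'p1'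
--
--     individual_scores={'p1':p1,'p2':p2}
--     return individual_scores
-- ===== SOURCE B (Python) =====
-- def cricket_scores(scores):
--     # pivot-find-then-slice-sum instead of A's toggling state machine
--     if not scores:
--         return {'p1': 0, 'p2': 0}
--     head, tail = scores[0], scores[1:]
--     if head % 2 == 0:
--         return {'p1': sum(tail), 'p2': head}
--     j = next((k for k, v in enumerate(tail) if v % 2 != 0), None)
--     if j is None:
--         return {'p1': head, 'p2': sum(tail)}
--     return {'p1': head + sum(tail[j + 1:]), 'p2': sum(tail[:j + 1])}
-- ===== Notes on version B (the rewrite author's own statement) =====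
-- stated objective: simpler
-- what changed: Replaced the index-driven toggling state machine with a direct case split: even first element, or find the first odd element of the tail and slice-sum around that pivot.
import Mathlib
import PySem

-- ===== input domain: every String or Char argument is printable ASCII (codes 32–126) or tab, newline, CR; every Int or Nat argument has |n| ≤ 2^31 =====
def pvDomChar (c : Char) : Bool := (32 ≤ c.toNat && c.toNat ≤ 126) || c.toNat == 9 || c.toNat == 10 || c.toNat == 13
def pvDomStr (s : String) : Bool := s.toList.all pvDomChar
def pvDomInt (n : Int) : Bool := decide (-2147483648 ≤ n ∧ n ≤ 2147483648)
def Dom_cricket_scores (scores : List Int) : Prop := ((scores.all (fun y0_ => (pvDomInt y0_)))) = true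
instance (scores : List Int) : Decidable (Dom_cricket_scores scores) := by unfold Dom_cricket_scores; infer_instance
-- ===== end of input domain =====

-- B replaces A's toggling state machine with a pivot-find-then-slice-sum case split (simpler, same cost).

-- ===== PORT A =====
-- loop body of A: state (p1, p2, to_add), element (i, player_score) from enumerate(scores)
-- (Python's % and Lean's Int % agree here because the divisor 2 is positive)
def cricketStep (s : Int × Int × Option String) (e : Int × Int) : Int × Int × Option String :=
  let p1 := s.1; let p2 := s.2.1; let to_add := s.2.2
  let i := e.1; let player_score := e.2
  let s1 : Int × Int × Option String :=
    if i == 0 && player_score % 2 != 0 then (p1 + player_score, p2, some "p2")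
    else if i == 0 && player_score % 2 == 0 then (p1, p2 + player_score, some "p1")
    else (p1, p2, to_add)
  if i != 0 then
    let p1 := s1.1; let p2 := s1.2.1; let to_add := s1.2.2
    let p1p2 : Int × Int := if to_add == some "p1" then (p1 + player_score, p2) else (p1, p2 + player_score)
    let to_add' : Option String := if player_score % 2 == 0 && to_add == some "p2" then some "p2" else some "p1"
    (p1p2.1, p1p2.2, to_add')
  else s1

def cricket_scores (scores : List Int) : List (String × Int) :=
  let st := (PySem.List.enumerate scores).foldl cricketStep (0, 0, none)
  [("p1", st.1), ("p2", st.2.1)]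

-- ===== PORT B =====
def cricket_scores_alt (scores : List Int) : List (String × Int) :=
  match scores with
  | [] => [("p1", 0), ("p2", 0)]
  | head :: tail =>
    if head % 2 == 0 then [("p1", tail.sum), ("p2", head)]
    else
      match tail.findIdx? (fun v => v % 2 != 0) with
      | none => [("p1", head), ("p2", tail.sum)]
      | some j => [("p1", head + (tail.drop (j + 1)).sum), ("p2", (tail.take (j + 1)).sum)]

-- ===== PRECONDITION & SPEC =====
def Spec_cricket_scores (scores : List Int) (out : List (String × Int)) : Prop := out = cricket_scores_alt scores
instance (scores : List Int) (out : List (String × Int)) : Decidable (Spec_cricket_scores scores out) := by unfold Spec_cricket_scores; infer_instance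

-- ===== CLAIM (what is proved, stated in full; the proofs are below) =====
def Claim_equal_cricket_scores : Prop := ∀ (scores : List Int), Dom_cricket_scores scores → Spec_cricket_scores scores (cricket_scores scores)

-- ===== LEMMAS AND PROOFS =====

-- the index-free behaviour of cricketStep on tail elements (index ≠ 0)
def tailStep (s : Int × Int × Option String) (x : Int) : Int × Int × Option String :=
  ((if s.2.2 == some "p1" then (s.1 + x, s.2.1) else (s.1, s.2.1 + x)).1,
   (if s.2.2 == some "p1" then (s.1 + x, s.2.1) else (s.1, s.2.1 + x)).2,
   if x % 2 == 0 && s.2.2 == some "p2" then some "p2" else some "p1")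

theorem cricketStep_pos (s : Int × Int × Option String) (i : Int) (hi : i ≠ 0) (x : Int) :
    cricketStep s (i, x) = tailStep s x := by
  simp [cricketStep, tailStep, hi]

theorem foldl_enum_eq_tailStep (l : List Int) (n : Int) (hn : 0 < n) (s : Int × Int × Option String) :
    (PySem.List.enumerate l n).foldl cricketStep s = l.foldl tailStep s := by
  induction l generalizing n s with
  | nil => rfl
  | cons x xs ih =>
      rw [PySem.List.enumerate_cons, List.foldl_cons, List.foldl_cons,
          cricketStep_pos s n (by omega) x]
      exact ih (n + 1) (by omega) _

-- once in the "p1" phase, everything is added to p1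
theorem foldl_tailStep_p1 (l : List Int) (p1 p2 : Int) :
    l.foldl tailStep (p1, p2, some "p1") = (p1 + l.sum, p2, some "p1") := by
  induction l generalizing p1 with
  | nil => simp
  | cons x xs ih =>
      rw [List.foldl_cons,
          show tailStep (p1, p2, some "p1") x = (p1 + x, p2, some "p1") from by simp [tailStep],
          ih (p1 + x)]
      simp [add_assoc]

-- in the "p2" phase, elements go to p2 up to and including the first odd one, then to p1
theorem foldl_tailStep_p2 (l : List Int) (p1 p2 : Int) :
    l.foldl tailStep (p1, p2, some "p2") =
      match l.findIdx? (fun v => v % 2 != 0) with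
      | none => (p1, p2 + l.sum, some "p2")
      | some j => (p1 + (l.drop (j + 1)).sum, p2 + (l.take (j + 1)).sum, some "p1") := by
  induction l generalizing p1 p2 with
  | nil => simp
  | cons x xs ih =>
      by_cases h : x % 2 = 0
      · -- even: stays in p2 phase
        rw [List.foldl_cons,
            show tailStep (p1, p2, some "p2") x = (p1, p2 + x, some "p2") from by simp [tailStep, h],
            ih p1 (p2 + x), List.findIdx?_cons]
        have h2 : ((fun v : Int => v % 2 != 0) x) = false := by simpa using h
        simp only [h2, Bool.false_eq_true, if_false]
        cases hf : xs.findIdx? (fun v => v % 2 != 0) with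
        | none => simp [add_assoc]
        | some j => simp [add_assoc]
      · -- odd: added to p2, then switch permanently to p1 phase
        rw [List.foldl_cons,
            show tailStep (p1, p2, some "p2") x = (p1, p2 + x, some "p1") from by simp [tailStep, h],
            foldl_tailStep_p1, List.findIdx?_cons]
        have h2 : ((fun v : Int => v % 2 != 0) x) = true := by simpa using h
        simp only [h2, if_true]
        simp

-- ===== VERDICT (by name: the statement is the Claim_ definition above) =====
theorem cricket_scores_spec : Claim_equal_cricket_scores := by
  intro scores _
  show cricket_scores scores = cricket_scores_alt scores
  cases scores with
  | nil => rfl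
  | cons head tail =>
      unfold cricket_scores cricket_scores_alt
      rw [PySem.List.enumerate_cons, List.foldl_cons]
      simp only [zero_add]
      rw [foldl_enum_eq_tailStep tail 1 (by omega)]
      by_cases h : head % 2 = 0
      · rw [show cricketStep (0, 0, none) (0, head) = ((0 : Int), head, some "p1") from by simp [cricketStep, h],
            foldl_tailStep_p1]
        simp [h]
      · rw [show cricketStep (0, 0, none) (0, head) = (head, (0 : Int), some "p2") from by
            simp [cricketStep]; intro hc; exact absurd (Int.emod_eq_zero_of_dvd hc) h,
            foldl_tailStep_p2]
        have h2 : ¬ (head % 2 == 0) = true := by simpa using h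
        cases hf : tail.findIdx? (fun v => v % 2 != 0) with
        | none => simp [h2]
        | some j => simp [h2]
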